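-- pv_equiv track=rewrite | github.com/bigricedumpling/haircut | deep_dive_report.py | find_first_match
-- ===== SOURCE A (Python) =====
-- def find_first_match(text, dictionary):
--     if not isinstance(text, str):
--         return "未知"
--     text_lower = text.lower()
--     for category, keywords in dictionary.items():
--         for kw in keywords:
--             if kw.lower() in text_lower:
--                 return category
--     return "未知"
-- ===== SOURCE B (Python) =====
-- def find_first_match(text, dictionary):
--     if not isinstance(text, str):
--         return "未知"
--     t = text.lower()
--     # precompute, for each distinct keyword length, the set of all substrings of t
--     # of that length; each keyword test becomes one set-membership lookup
--     lengths = {len(kw.lower()) for kws in dictionary.values() for kw in kws}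
--     subs = {t[i:i + l] for l in lengths for i in range(len(t) - l + 1)}
--     for category, keywords in dictionary.items():
--         if any(kw.lower() in subs for kw in keywords):
--             return category
--     return "未知"
-- ===== Notes on version B (the rewrite author's own statement) =====
-- stated objective: alternative
-- what changed: B precomputes, for each distinct keyword length, the set of all substrings of the lowered text of that length, so each keyword test is a single set-membership lookup instead of A's per-keyword substring scan over the text.
import Mathlib
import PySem

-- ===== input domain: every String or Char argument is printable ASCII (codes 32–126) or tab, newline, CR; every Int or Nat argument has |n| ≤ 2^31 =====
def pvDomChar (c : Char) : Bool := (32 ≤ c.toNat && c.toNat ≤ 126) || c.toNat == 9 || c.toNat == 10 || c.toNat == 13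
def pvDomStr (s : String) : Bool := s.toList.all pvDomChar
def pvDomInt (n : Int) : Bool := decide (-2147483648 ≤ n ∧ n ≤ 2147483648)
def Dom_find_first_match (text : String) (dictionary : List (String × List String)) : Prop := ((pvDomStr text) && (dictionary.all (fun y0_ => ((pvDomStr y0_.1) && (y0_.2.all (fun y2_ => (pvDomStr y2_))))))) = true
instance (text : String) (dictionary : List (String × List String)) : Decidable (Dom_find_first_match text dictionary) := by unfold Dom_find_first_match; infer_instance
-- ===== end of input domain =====

-- B replaces A's per-keyword substring scan by a precomputed set of substrings
-- of the lowered text, each keyword test becoming one set-membership lookup (objective: alternative).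

-- ===== PORT A =====
-- A: nested loops — for each category in order, scan its keywords; return the
-- category on the first keyword whose lowercase form is a substring of text.lower().
-- (In Lean, text : String is always a str, so A's isinstance guard cannot fire.)
def fm_inner (t : String) : List String → Bool
  | [] => false
  | kw :: rest => if PySem.Str.isIn (PySem.Str.lower kw) t then true else fm_inner t rest

def fm_outer (t : String) : List (String × List String) → String
  | [] => "未知"
  | (category, keywords) :: rest =>
    if fm_inner t keywords then category else fm_outer t rest

def find_first_match (text : String) (dictionary : List (String × List String)) : String :=
  fm_outer (PySem.Str.lower text) dictionary

-- ===== PORT B =====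
-- B: lengths = {len(kw.lower()) …}; subs = {t[i:i+l] for l in lengths for i in range(len(t)-l+1)}
-- — the set of all substrings of the lowered text whose length is a keyword length —
-- then scan categories testing membership in subs.
def fmb_lengths (dictionary : List (String × List String)) : PySem.Set Int :=
  PySem.Set.ofList
    (dictionary.flatMap (fun p => p.2.map (fun kw => PySem.Str.len (PySem.Str.lower kw))))

def fmb_subs (t : String) (lens : PySem.Set Int) : PySem.Set String :=
  PySem.Set.ofList
    (lens.flatMap (fun l =>
      (PySem.List.pyRange 0 (PySem.Str.len t - l + 1) 1).map
        (fun i => PySem.Str.slice t (some i) (some (i + l)))))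

def fmb_loop (subs : PySem.Set String) : List (String × List String) → String
  | [] => "未知"
  | (category, keywords) :: rest =>
    if keywords.any (fun kw => PySem.Set.contains subs (PySem.Str.lower kw)) then category
    else fmb_loop subs rest

def find_first_match_alt (text : String) (dictionary : List (String × List String)) : String :=
  fmb_loop (fmb_subs (PySem.Str.lower text) (fmb_lengths dictionary)) dictionary

-- ===== PRECONDITION & SPEC =====
def Spec_find_first_match (text : String) (dictionary : List (String × List String)) (out : String) : Prop := out = find_first_match_alt text dictionary
instance (text : String) (dictionary : List (String × List String)) (out : String) : Decidable (Spec_find_first_match text dictionary out) := by unfold Spec_find_first_match; infer_instance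

-- ===== CLAIM (what is proved, stated in full; the proofs are below) =====
def Claim_equal_find_first_match : Prop := ∀ (text : String) (dictionary : List (String × List String)), Dom_find_first_match text dictionary → Spec_find_first_match text dictionary (find_first_match text dictionary)

-- ===== LEMMAS AND PROOFS =====

-- a (drop-then-take) slice is an infix
theorem dropTake_infix (l : List Char) (a k : Nat) :
    List.take k (List.drop a l) <:+: l :=
  (List.take_prefix k (List.drop a l)).isInfix.trans (List.drop_suffix a l).isInfix

-- every length stored in fmb_lengths is nonnegative
theorem fmb_lengths_nonneg (d : List (String × List String)) :
    ∀ l ∈ fmb_lengths d, 0 ≤ l := by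
  intro l hl
  unfold fmb_lengths at hl
  rw [PySem.Set.mem_ofList, List.mem_flatMap] at hl
  obtain ⟨p, _, hm⟩ := hl
  rw [List.mem_map] at hm
  obtain ⟨kw, _, rfl⟩ := hm
  rw [PySem.Str.len_eq]
  positivity

-- every keyword of the dictionary has its lowered length in fmb_lengths
theorem mem_fmb_lengths (d : List (String × List String)) (p : String × List String)
    (kw : String) (hp : p ∈ d) (hkw : kw ∈ p.2) :
    PySem.Str.len (PySem.Str.lower kw) ∈ fmb_lengths d := by
  unfold fmb_lengths
  rw [PySem.Set.mem_ofList, List.mem_flatMap]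
  exact ⟨p, hp, List.mem_map.mpr ⟨kw, hkw, rfl⟩⟩

-- membership in the substring set: exactly the infixes of t whose length is in lens
theorem mem_fmb_subs (t : String) (lens : PySem.Set Int)
    (hL : ∀ l ∈ lens, 0 ≤ l) (s : String) :
    s ∈ fmb_subs t lens ↔
      ∃ l ∈ lens, (s.toList.length : Int) = l ∧ s.toList <:+: t.toList := by
  unfold fmb_subs
  rw [PySem.Set.mem_ofList, List.mem_flatMap]
  constructor
  · rintro ⟨l, hl, hmem⟩
    rw [List.mem_map] at hmem
    obtain ⟨i, hi, rfl⟩ := hmem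
    rw [PySem.List.mem_pyRange_one, PySem.Str.len_eq] at hi
    have h0l : 0 ≤ l := hL l hl
    have h0i : 0 ≤ i := hi.1
    have hsum : i + l ≤ (t.toList.length : Int) := by omega
    have hslice : (PySem.Str.slice t (some i) (some (i + l))).toList
        = List.take l.toNat (List.drop i.toNat t.toList) := by
      rw [PySem.Str.toList_slice, PySem.Chars.slice_eq_listSlice,
        PySem.List.slice_toNat t.toList h0i (by omega)]
      congr 1
      omega
    refine ⟨l, hl, ?_, ?_⟩
    · rw [hslice]
      simp only [List.length_take, List.length_drop]
      omega
    · rw [hslice]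
      exact dropTake_infix t.toList i.toNat l.toNat
  · rintro ⟨l, hl, hlen, p, q, hpq⟩
    have hlen' : p.length + s.toList.length + q.length = t.toList.length := by
      rw [← hpq]; simp; omega
    refine ⟨l, hl, ?_⟩
    rw [List.mem_map]
    refine ⟨(p.length : Int), ?_, ?_⟩
    · rw [PySem.List.mem_pyRange_one, PySem.Str.len_eq]
      constructor
      · positivity
      · omega
    · have hcast : (p.length : Int) + l = ((p.length + s.toList.length : Nat) : Int) := by
        push_cast
        omega
      rw [hcast]
      have : (PySem.Str.slice t (some (p.length : Int))
          (some ((p.length + s.toList.length : Nat) : Int))).toList = s.toList := by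
        rw [PySem.Str.toList_slice, PySem.Chars.slice_eq_listSlice,
          PySem.List.slice_natCast, ← hpq, List.append_assoc,
          List.drop_left, Nat.add_sub_cancel_left, List.take_left]
      exact String.toList_inj.mp this

-- for a keyword whose lowered length is recorded, membership IS Python's 'sub in t'
theorem contains_fmb_subs (t : String) (lens : PySem.Set Int)
    (hL : ∀ l ∈ lens, 0 ≤ l) (s : String)
    (hs : PySem.Str.len s ∈ lens) :
    PySem.Set.contains (fmb_subs t lens) s = PySem.Str.isIn s t := by
  rw [Bool.eq_iff_iff, PySem.Str.isIn_iff_infix]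
  have hc : PySem.Set.contains (fmb_subs t lens) s = true ↔ s ∈ fmb_subs t lens := by
    simp [PySem.Set.contains]
  rw [hc, mem_fmb_subs t lens hL s]
  constructor
  · rintro ⟨l, _, _, hinf⟩
    exact hinf
  · intro hinf
    refine ⟨PySem.Str.len s, hs, ?_, hinf⟩
    rw [PySem.Str.len_eq]

-- A's inner loop = B's any-over-set test (for keywords with recorded lengths)
theorem fm_inner_eq_any (t : String) (lens : PySem.Set Int)
    (hL : ∀ l ∈ lens, 0 ≤ l) (kws : List String)
    (hk : ∀ kw ∈ kws, PySem.Str.len (PySem.Str.lower kw) ∈ lens) :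
    fm_inner t kws
      = kws.any (fun kw => PySem.Set.contains (fmb_subs t lens) (PySem.Str.lower kw)) := by
  induction kws with
  | nil => rfl
  | cons kw rest ih =>
    rw [List.any_cons,
      contains_fmb_subs t lens hL (PySem.Str.lower kw) (hk kw List.mem_cons_self)]
    simp only [fm_inner]
    rw [ih (fun kw' h => hk kw' (List.mem_cons_of_mem kw h))]
    cases PySem.Str.isIn (PySem.Str.lower kw) t <;> simp

theorem fm_agree (t : String) (lens : PySem.Set Int)
    (hL : ∀ l ∈ lens, 0 ≤ l) (d : List (String × List String))
    (hd : ∀ p ∈ d, ∀ kw ∈ p.2, PySem.Str.len (PySem.Str.lower kw) ∈ lens) :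
    fm_outer t d = fmb_loop (fmb_subs t lens) d := by
  induction d with
  | nil => rfl
  | cons hd' rest ih =>
    obtain ⟨c, kws⟩ := hd'
    simp only [fm_outer, fmb_loop]
    rw [fm_inner_eq_any t lens hL kws (fun kw h => hd (c, kws) List.mem_cons_self kw h),
      ih (fun p hp kw h => hd p (List.mem_cons_of_mem _ hp) kw h)]

-- ===== VERDICT (by name: the statement is the Claim_ definition above) =====
theorem find_first_match_spec : Claim_equal_find_first_match := by
  intro text dictionary _
  unfold Spec_find_first_match find_first_match find_first_match_alt
  exact fm_agree (PySem.Str.lower text) (fmb_lengths dictionary)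
    (fmb_lengths_nonneg dictionary) dictionary
    (fun p hp kw hkw => mem_fmb_lengths dictionary p kw hp hkw)
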